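-- pv_equiv track=rewrite | github.com/b-zhu524/usaco_practice | jan_22_bronze/p2/dice.py | beat
-- ===== SOURCE A (Python) =====
-- def beat(a, b):
--     a_vict = 0
--     b_vict = 0
--     tie = 0
--     for num1 in a:
--         for num2 in b:
--             if num1 > num2:
--                 a_vict += 1
--             elif num1 == num2:
--                 tie += 1
--             else:
--                 b_vict += 1
--     if a_vict > b_vict:
--         return 1
--     if a_vict == b_vict:
--         return 0
--     return -1
-- ===== SOURCE B (Python) =====
-- def _prefix_count(sb, x, inclusive):
--     # number of leading elements of sorted list sb that are < x (or <= x if inclusive)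
--     lo, hi = 0, len(sb)
--     while lo < hi:
--         mid = (lo + hi) // 2
--         v = sb[mid]
--         if v < x or (inclusive and v == x):
--             lo = mid + 1
--         else:
--             hi = mid
--     return lo
--
--
-- def beat(a, b):
--     sb = sorted(b)
--     n = len(sb)
--     d = 0
--     for x in a:
--         d += _prefix_count(sb, x, False) - (n - _prefix_count(sb, x, True))
--     return (d > 0) - (d < 0)
-- ===== Notes on version B (the rewrite author's own statement) =====
-- stated objective: faster
-- what changed: Instead of comparing every pair with nested loops and three counters, B sorts b once and for each element of a counts smaller/larger elements with a hand-written binary search, accumulating the win difference and returning its sign.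
import Mathlib
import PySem

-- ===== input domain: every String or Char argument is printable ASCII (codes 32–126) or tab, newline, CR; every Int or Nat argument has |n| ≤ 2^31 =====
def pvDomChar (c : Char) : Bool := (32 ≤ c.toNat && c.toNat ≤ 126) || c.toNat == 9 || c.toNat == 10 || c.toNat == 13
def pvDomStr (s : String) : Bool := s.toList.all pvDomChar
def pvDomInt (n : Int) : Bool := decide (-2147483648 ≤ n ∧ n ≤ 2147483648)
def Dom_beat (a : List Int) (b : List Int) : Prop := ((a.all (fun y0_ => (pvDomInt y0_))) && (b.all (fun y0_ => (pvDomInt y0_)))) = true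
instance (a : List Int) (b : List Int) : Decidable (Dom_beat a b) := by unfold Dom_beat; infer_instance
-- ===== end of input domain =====

-- B replaces A's nested pairwise loops by sorting b once and counting, per element of a,
-- the smaller/larger elements with a hand-written binary search (asymptotically faster).

-- ===== PORT A =====
-- state is (a_vict, tie, b_vict); branches in A's order
def beat (a : List Int) (b : List Int) : Int :=
  let s : Int × Int × Int :=
    a.foldl (fun s num1 =>
      b.foldl (fun s num2 =>
        if num1 > num2 then (s.1 + 1, s.2.1, s.2.2)
        else if num1 = num2 then (s.1, s.2.1 + 1, s.2.2)
        else (s.1, s.2.1, s.2.2 + 1)) s) (0, 0, 0)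
  if s.1 > s.2.2 then 1
  else if s.1 = s.2.2 then 0
  else -1

-- ===== PORT B =====
-- _prefix_count's while-loop; sb[mid] is always in range in B, ported as getD mid 0
def bsLoop (sb : List Int) (c : Int → Bool) (lo hi : Nat) : Nat :=
  if _h : lo < hi then
    let mid := (lo + hi) / 2
    if c (sb.getD mid 0) then bsLoop sb c (mid + 1) hi
    else bsLoop sb c lo mid
  else lo
termination_by hi - lo
decreasing_by all_goals omega

-- _prefix_count(sb, x, inclusive)
def prefixCount (sb : List Int) (x : Int) (inclusive : Bool) : Nat :=
  bsLoop sb (fun v => decide (v < x) || (inclusive && (v == x))) 0 sb.length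

def beat_alt (a : List Int) (b : List Int) : Int :=
  let sb := PySem.List.sorted b (fun y => y) false
  let n := sb.length
  let d : Int :=
    a.foldl (fun d x =>
      d + ((prefixCount sb x false : Int) - ((n : Int) - (prefixCount sb x true : Int)))) 0
  (if 0 < d then 1 else 0) - (if d < 0 then 1 else 0)

-- ===== PRECONDITION & SPEC =====
def Spec_beat (a : List Int) (b : List Int) (out : Int) : Prop := out = beat_alt a b
instance (a : List Int) (b : List Int) (out : Int) : Decidable (Spec_beat a b out) := by unfold Spec_beat; infer_instance

-- ===== CLAIM (what is proved, stated in full; the proofs are below) =====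
def Claim_equal_beat : Prop := ∀ (a : List Int) (b : List Int), Dom_beat a b → Spec_beat a b (beat a b)

-- ===== LEMMAS AND PROOFS =====

-- count, as Int, of elements of b strictly below / strictly above x
def ltc (b : List Int) (x : Int) : Int := (b.countP (fun y => decide (y < x)) : Int)
def gtc (b : List Int) (x : Int) : Int := (b.countP (fun y => decide (x < y)) : Int)
def eqc (b : List Int) (x : Int) : Int := (b.countP (fun y => decide (y = x)) : Int)

-- A's inner loop adds the three counts to the running triple
lemma beat_inner (num1 : Int) (b : List Int) (s : Int × Int × Int) :
    b.foldl (fun s num2 =>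
        if num1 > num2 then (s.1 + 1, s.2.1, s.2.2)
        else if num1 = num2 then (s.1, s.2.1 + 1, s.2.2)
        else (s.1, s.2.1, s.2.2 + 1)) s
      = (s.1 + ltc b num1, s.2.1 + eqc b num1, s.2.2 + gtc b num1) := by
  induction b generalizing s with
  | nil => simp [ltc, eqc, gtc]
  | cons y ys ih =>
    simp only [List.foldl_cons, ih, ltc, eqc, gtc, List.countP_cons]
    by_cases h1 : num1 > y
    · simp [h1, show ¬(num1 = y) by omega, show decide (y < num1) = true by simpa using h1,
        show decide (y = num1) = false by simp; omega, show decide (num1 < y) = false by simp; omega]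
      push_cast; ring_nf
    · by_cases h2 : num1 = y
      · simp [h1, h2]
        push_cast; ring_nf
      · simp [h1, h2, show decide (y < num1) = false by simp; omega,
          show decide (y = num1) = false by simp; omega, show decide (num1 < y) = true by simp; omega]
        push_cast; ring_nf

-- A's outer loop computes the sums of the per-element counts
lemma beat_outer (a b : List Int) (s : Int × Int × Int) :
    a.foldl (fun s num1 =>
      b.foldl (fun s num2 =>
        if num1 > num2 then (s.1 + 1, s.2.1, s.2.2)
        else if num1 = num2 then (s.1, s.2.1 + 1, s.2.2)
        else (s.1, s.2.1, s.2.2 + 1)) s) s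
      = (s.1 + (a.map (ltc b)).sum, s.2.1 + (a.map (eqc b)).sum, s.2.2 + (a.map (gtc b)).sum) := by
  induction a generalizing s with
  | nil => simp
  | cons x xs ih =>
    rw [List.foldl_cons, beat_inner, ih]
    simp only [List.map_cons, List.sum_cons, Prod.mk.injEq]
    refine ⟨by ring, by ring, by ring⟩

-- if all indices below r satisfy c and all from r on do not, then countP c = r
lemma countP_eq_of_threshold (c : Int → Bool) :
    ∀ (sb : List Int) (r : Nat), r ≤ sb.length →
      (∀ k, k < r → c (sb.getD k 0) = true) →
      (∀ k, r ≤ k → k < sb.length → c (sb.getD k 0) = false) →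
      sb.countP c = r := by
  intro sb
  induction sb with
  | nil => intro r hr _ _; simp only [List.length_nil, Nat.le_zero] at hr; simp [hr]
  | cons y ys ih =>
    intro r hr hlo hhi
    cases r with
    | zero =>
      have : ∀ z ∈ y :: ys, c z = false := by
        intro z hz
        obtain ⟨k, hk, hget⟩ := List.getElem_of_mem hz
        have := hhi k (Nat.zero_le _) (by simpa using hk)
        rwa [List.getD_eq_getElem _ _ hk, hget] at this
      simp [List.countP_eq_zero.mpr (by intro z hz; simpa using this z hz)]
    | succ r' =>
      have hy : c y = true := by simpa using hlo 0 (Nat.succ_pos _)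
      have htail : ys.countP c = r' := by
        apply ih r' (by simpa using hr)
        · intro k hk; simpa using hlo (k + 1) (by omega)
        · intro k hk hk'; simpa using hhi (k + 1) (by omega) (by simpa using hk')
      simp [List.countP_cons, hy, htail]

-- binary-search loop correctness, given the downward-closure of c along sb
lemma bsLoop_eq_countP (sb : List Int) (c : Int → Bool)
    (hdc : ∀ i j : Nat, i ≤ j → j < sb.length → c (sb.getD j 0) = true → c (sb.getD i 0) = true) :
    ∀ (fuel lo hi : Nat), hi - lo ≤ fuel → lo ≤ hi → hi ≤ sb.length →
      (∀ k, k < lo → c (sb.getD k 0) = true) →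
      (∀ k, hi ≤ k → k < sb.length → c (sb.getD k 0) = false) →
      bsLoop sb c lo hi = sb.countP c := by
  intro fuel
  induction fuel with
  | zero =>
    intro lo hi hf hlh hhlen hlo hhi
    have : lo = hi := by omega
    rw [bsLoop]
    simp [show ¬ lo < hi by omega]
    exact (countP_eq_of_threshold c sb lo (by omega) hlo (by intro k hk hk'; exact hhi k (by omega) hk')).symm
  | succ f ih =>
    intro lo hi hf hlh hhlen hlo hhi
    rw [bsLoop]
    by_cases h : lo < hi
    · simp only [h, dite_true]
      set mid := (lo + hi) / 2 with hmid
      have hmlo : lo ≤ mid := by omega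
      have hmhi : mid < hi := by omega
      by_cases hc : c (sb.getD mid 0) = true
      · simp only [hc, if_true]
        apply ih (mid + 1) hi (by omega) (by omega) hhlen
        · intro k hk
          rcases Nat.lt_or_ge k lo with hkl | hkl
          · exact hlo k hkl
          · exact hdc k mid (by omega) (by omega) hc
        · exact hhi
      · simp only [hc]
        apply ih lo mid (by omega) (by omega) (by omega) hlo
        · intro k hk hk'
          cases hck : c (sb.getD k 0) with
          | false => rfl
          | true => exact absurd (hdc mid k hk hk' hck) hc
    · simp [h]
      have : lo = hi := by omega
      exact (countP_eq_of_threshold c sb lo (by omega) hlo (by intro k hk hk'; exact hhi k (by omega) hk')).symm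

-- prefixCount on sorted(b) counts the elements of b below x (strictly / weakly)
lemma prefixCount_false (b : List Int) (x : Int) :
    (prefixCount (PySem.List.sorted b (fun y => y) false) x false : Int) = ltc b x := by
  set sb := PySem.List.sorted b (fun y => y) false with hsb
  have hperm : sb.Perm b := PySem.List.sorted_perm b (fun y => y) false
  have hc : prefixCount sb x false = sb.countP (fun v => decide (v < x) || (false && (v == x))) := by
    apply bsLoop_eq_countP
    · intro i j hij hj hcj
      have hi : i < sb.length := by omega
      have hle : sb.getD i 0 ≤ sb.getD j 0 := by
        rw [List.getD_eq_getElem _ _ hi, List.getD_eq_getElem _ _ hj]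
        exact PySem.List.sorted_id_getElem_mono b hij hj
      simp only [Bool.false_and, Bool.or_false, decide_eq_true_eq] at hcj ⊢
      omega
    · exact Nat.le_refl _
    · exact Nat.zero_le _
    · exact Nat.le_refl _
    · intro k hk; omega
    · intro k hk hk'; omega
  rw [ltc, ← hperm.countP_eq, hc]
  congr 1
  apply List.countP_congr
  intro z _
  simp
lemma prefixCount_true (b : List Int) (x : Int) :
    (prefixCount (PySem.List.sorted b (fun y => y) false) x true : Int)
      = ltc b x + eqc b x := by
  set sb := PySem.List.sorted b (fun y => y) false with hsb
  have hperm : sb.Perm b := PySem.List.sorted_perm b (fun y => y) false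
  have hc : prefixCount sb x true = sb.countP (fun v => decide (v < x) || (true && (v == x))) := by
    apply bsLoop_eq_countP
    · intro i j hij hj hcj
      have hi : i < sb.length := by omega
      have hle : sb.getD i 0 ≤ sb.getD j 0 := by
        rw [List.getD_eq_getElem _ _ hi, List.getD_eq_getElem _ _ hj]
        exact PySem.List.sorted_id_getElem_mono b hij hj
      simp only [Bool.true_and, beq_iff_eq, Bool.or_eq_true, decide_eq_true_eq] at hcj ⊢
      omega
    · exact Nat.le_refl _
    · exact Nat.zero_le _
    · exact Nat.le_refl _
    · intro k hk; omega
    · intro k hk hk'; omega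
  have hsplit : sb.countP (fun v => decide (v < x) || (true && (v == x)))
      = sb.countP (fun v => decide (v < x)) + sb.countP (fun v => decide (v = x)) := by
    induction sb with
    | nil => simp
    | cons z zs ihz =>
      simp only [List.countP_cons, ihz]
      by_cases h1 : z < x <;> by_cases h2 : z = x <;> simp [h1, h2] <;> omega
  rw [ltc, eqc, ← hperm.countP_eq, ← hperm.countP_eq (p := fun y => decide (y = x)), hc, hsplit]
  push_cast; ring

-- count of strictly-greater elements = length - count of weakly-smaller ones
lemma gtc_eq (b : List Int) (x : Int) :
    gtc b x = (b.length : Int) - (ltc b x + eqc b x) := by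
  induction b with
  | nil => simp [gtc, ltc, eqc]
  | cons y ys ih =>
    simp only [gtc, ltc, eqc, List.countP_cons, List.length_cons] at ih ⊢
    by_cases h1 : y < x
    · simp [h1, show ¬ x < y by omega, show ¬ y = x by omega]; push_cast at ih ⊢; omega
    · by_cases h2 : y = x
      · simp [h2, show ¬ x < x by omega]; push_cast at ih ⊢; omega
      · simp [h1, h2, show x < y by omega]; push_cast at ih ⊢; omega

-- B's loop accumulates the difference of the per-element counts
lemma beat_alt_fold (a b : List Int) (sb : List Int) (hsb : sb = PySem.List.sorted b (fun y => y) false)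
    (d : Int) :
    a.foldl (fun d x =>
      d + ((prefixCount sb x false : Int) - ((sb.length : Int) - (prefixCount sb x true : Int)))) d
      = d + (a.map (fun x => ltc b x - gtc b x)).sum := by
  induction a generalizing d with
  | nil => simp
  | cons x xs ih =>
    simp only [List.foldl_cons, List.map_cons, List.sum_cons, ih]
    have hlen : (sb.length : Int) = (b.length : Int) := by
      rw [hsb, PySem.List.length_sorted]
    rw [hsb, prefixCount_false, prefixCount_true, ← hsb, hlen, gtc_eq]
    ring

lemma sum_map_sub (a : List Int) (f g : Int → Int) :
    (a.map (fun x => f x - g x)).sum = (a.map f).sum - (a.map g).sum := by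
  induction a with
  | nil => simp
  | cons x xs ih => simp [ih]; ring

-- ===== VERDICT (by name: the statement is the Claim_ definition above) =====
theorem beat_spec : Claim_equal_beat := by
  intro a b _
  unfold Spec_beat beat beat_alt
  simp only [beat_outer, beat_alt_fold a b _ rfl, zero_add, sum_map_sub]
  set av := (a.map (ltc b)).sum
  set bv := (a.map (gtc b)).sum
  by_cases h1 : av > bv
  · simp [h1, show 0 < av - bv by omega, show ¬ av - bv < 0 by omega]
  · by_cases h2 : av = bv
    · simp [h1, h2]
    · simp [h1, h2, show ¬ (0 : Int) < av - bv by omega, show av - bv < 0 by omega]
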